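-- pv_equiv track=rewrite | github.com/tesla741/Python_vca | comp_detector4.py | infer_compliance
-- ===== SOURCE A (Python) =====
-- def isCovered(subset_key, subset_value, superset):
--     superset_keys = superset.keys()
--     for key in superset_keys:
--         if subset_key >= key:
--             superset_values = superset[key]
--             for val in superset_values:
--                 if subset_value <= val:
--                     return True
--     return False
--
-- def infer_compliance(yy, yn, denominator):
--     numerator = 0
--     if denominator == 0:
--         return
--     for key in yn.keys():
--         for val in yn[key]:
--             if (not isCovered(key, val, yy)):
--                 numerator += 1
--     return numerator
-- ===== SOURCE B (Python) =====
-- def infer_compliance(yy, yn, denominator):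
--     if denominator == 0:
--         return None
--     # (key, max-of-values) for yy entries with a nonempty value list, sorted by key
--     pts = sorted(((k, max(vs)) for k, vs in yy.items() if vs), key=lambda p: p[0])
--     keys = []
--     pref = []
--     best = None
--     for k, m in pts:
--         best = m if best is None or m > best else best
--         keys.append(k)
--         pref.append(best)
--     numerator = 0
--     for key, vals in yn.items():
--         for val in vals:
--             # rightmost insertion point: first index whose key exceeds `key`
--             lo, hi = 0, len(keys)
--             while lo < hi:
--                 mid = (lo + hi) // 2
--                 if keys[mid] <= key:
--                     lo = mid + 1
--                 else:
--                     hi = mid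
--             if lo == 0 or pref[lo - 1] < val:
--                 numerator += 1
--     return numerator
-- ===== Notes on version B (the rewrite author's own statement) =====
-- stated objective: alternative
-- what changed: Replaces the per-pair nested scan over yy (isCovered) by a precomputed key-sorted prefix-maximum table over yy's per-key maxima queried with a hand-written binary search per yn pair.
import Mathlib
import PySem

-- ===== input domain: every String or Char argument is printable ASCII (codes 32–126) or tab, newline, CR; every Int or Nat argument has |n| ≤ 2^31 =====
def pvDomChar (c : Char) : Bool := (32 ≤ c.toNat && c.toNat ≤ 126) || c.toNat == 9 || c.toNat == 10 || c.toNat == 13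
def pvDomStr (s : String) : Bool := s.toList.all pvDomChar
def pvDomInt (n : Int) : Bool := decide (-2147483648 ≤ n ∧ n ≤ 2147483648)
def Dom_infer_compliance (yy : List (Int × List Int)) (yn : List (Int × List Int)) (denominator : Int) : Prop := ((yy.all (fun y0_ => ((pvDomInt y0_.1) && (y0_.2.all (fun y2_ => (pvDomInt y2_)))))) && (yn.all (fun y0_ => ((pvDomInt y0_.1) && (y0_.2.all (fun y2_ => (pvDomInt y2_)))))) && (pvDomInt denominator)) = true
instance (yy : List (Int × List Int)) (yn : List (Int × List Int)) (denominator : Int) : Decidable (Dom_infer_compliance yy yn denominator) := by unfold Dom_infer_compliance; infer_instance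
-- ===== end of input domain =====

-- B replaces A's per-pair nested scan over yy by a key-sorted prefix-maximum table
-- queried with a binary search per yn pair (objective: alternative).
-- Dicts are association lists (insertion order, unique keys in Python): lookup = first
-- match, key iteration = first-occurrence order (PySem.List.dedup), in both ports.

-- ===== PORT A =====
-- dict lookup d[k] (first match; [] never occurs for keys taken from d itself)
def pvLookup (d : List (Int × List Int)) (k : Int) : List Int :=
  ((d.find? (fun p => p.1 == k)).map (·.2)).getD []

def isCovered (subset_key subset_value : Int) (superset : List (Int × List Int)) : Bool :=
  (PySem.List.dedup (superset.map (·.1))).any (fun key =>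
    decide (key ≤ subset_key) &&
      (pvLookup superset key).any (fun val => decide (subset_value ≤ val)))

def infer_compliance (yy : List (Int × List Int)) (yn : List (Int × List Int)) (denominator : Int) : Option Int :=
  if denominator = 0 then none
  else
    some ((PySem.List.dedup (yn.map (·.1))).foldl (fun numerator key =>
      (pvLookup yn key).foldl (fun numerator val =>
        if !isCovered key val yy then numerator + 1 else numerator) numerator) 0)

-- ===== PORT B =====
-- dict .items() view of an association list
def pvItems (d : List (Int × List Int)) : List (Int × List Int) :=
  (PySem.List.dedup (d.map (·.1))).map (fun k => (k, pvLookup d k))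

-- sorted(((k, max(vs)) for k, vs in yy.items() if vs), key=lambda p: p[0])
def pvMaxPts (yy : List (Int × List Int)) : List (Int × Int) :=
  PySem.List.sorted ((pvItems yy).filterMap (fun p =>
    match p.2 with
    | [] => none
    | x :: t => some (p.1, t.foldl max x))) (fun p => p.1) false

-- the keys/pref building loop, carrying the running `best`
def pvBuild : List (Int × Int) → Option Int → List Int × List Int
  | [], _ => ([], [])
  | (k, m) :: t, best =>
    let b := match best with
      | none => m
      | some b0 => if m > b0 then m else b0
    let r := pvBuild t (some b)
    (k :: r.1, b :: r.2)

-- the `while lo < hi` binary-search loop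
def pvBisect (keys : List Int) (key : Int) (lo hi : Int) : Int :=
  if h : lo < hi then
    let mid := PySem.Int.floordiv (lo + hi) 2
    if PySem.List.pyGetD keys mid 0 ≤ key then pvBisect keys key (mid + 1) hi
    else pvBisect keys key lo mid
  else lo
termination_by (hi - lo).toNat
decreasing_by
  · have h1 := PySem.Int.floordiv_two_mid_bounds (le_of_lt h)
    omega
  · have h2 : PySem.Int.floordiv (lo + hi) 2 < hi := by
      rw [PySem.Int.floordiv_lt_iff_lt_mul (by norm_num)]
      omega
    omega

def infer_compliance_alt (yy : List (Int × List Int)) (yn : List (Int × List Int)) (denominator : Int) : Option Int :=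
  if denominator = 0 then none
  else
    let kp := pvBuild (pvMaxPts yy) none
    some ((pvItems yn).foldl (fun numerator p =>
      p.2.foldl (fun numerator val =>
        let lo := pvBisect kp.1 p.1 0 (kp.1.length : Int)
        if lo = 0 ∨ PySem.List.pyGetD kp.2 (lo - 1) 0 < val then numerator + 1
        else numerator) numerator) 0)

-- ===== PRECONDITION & SPEC =====
def Spec_infer_compliance (yy : List (Int × List Int)) (yn : List (Int × List Int)) (denominator : Int) (out : Option Int) : Prop := out = infer_compliance_alt yy yn denominator
instance (yy : List (Int × List Int)) (yn : List (Int × List Int)) (denominator : Int) (out : Option Int) : Decidable (Spec_infer_compliance yy yn denominator out) := by unfold Spec_infer_compliance; infer_instance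

-- ===== CLAIM (what is proved, stated in full; the proofs are below) =====
def Claim_equal_infer_compliance : Prop := ∀ (yy : List (Int × List Int)) (yn : List (Int × List Int)) (denominator : Int), Dom_infer_compliance yy yn denominator → Spec_infer_compliance yy yn denominator (infer_compliance yy yn denominator)

-- ===== LEMMAS AND PROOFS =====

-- any (val ≤ ·) over a nonempty list is a comparison with its running max
lemma pvAnyLeMax (x : Int) (t : List Int) (val : Int) :
    (x :: t).any (fun v => decide (val ≤ v)) = true ↔ val ≤ t.foldl max x := by
  simp only [List.any_eq_true, decide_eq_true_eq]
  constructor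
  · rintro ⟨v, hv, hle⟩
    rcases List.mem_cons.mp hv with rfl | hv
    · exact le_trans hle (PySem.List.le_foldl_max t v).1
    · exact le_trans hle ((PySem.List.le_foldl_max t x).2 v hv)
  · intro hle
    rcases PySem.List.foldl_max_mem t x with h | h
    · exact ⟨x, List.mem_cons_self, h ▸ hle⟩
    · exact ⟨t.foldl max x, List.mem_cons_of_mem _ h, hle⟩

-- A's isCovered test as an existential over the (key, max) points
lemma pvCovered_iff (yy : List (Int × List Int)) (key val : Int) :
    isCovered key val yy = true ↔
      ∃ p ∈ pvMaxPts yy, p.1 ≤ key ∧ val ≤ p.2 := by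
  unfold isCovered pvMaxPts pvItems
  constructor
  · intro h
    rw [List.any_eq_true] at h
    obtain ⟨k, hk, hcond⟩ := h
    rw [Bool.and_eq_true, decide_eq_true_eq] at hcond
    obtain ⟨hkey, hany⟩ := hcond
    cases hv : pvLookup yy k with
    | nil => rw [hv] at hany; simp at hany
    | cons x t =>
      rw [hv] at hany
      refine ⟨(k, t.foldl max x), ?_, hkey, (pvAnyLeMax x t val).mp hany⟩
      rw [(PySem.List.sorted_perm _ _ _).mem_iff, List.mem_filterMap]
      exact ⟨(k, pvLookup yy k), List.mem_map.mpr ⟨k, hk, rfl⟩, by rw [hv]⟩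
  · rintro ⟨p, hp, hkey, hval⟩
    rw [(PySem.List.sorted_perm _ _ _).mem_iff, List.mem_filterMap] at hp
    obtain ⟨a, ha, hfa⟩ := hp
    obtain ⟨k, hk, rfl⟩ := List.mem_map.mp ha
    rw [List.any_eq_true]
    cases hv : pvLookup yy k with
    | nil => rw [hv] at hfa; simp at hfa
    | cons x t =>
      rw [hv] at hfa
      simp only [Option.some.injEq] at hfa
      refine ⟨k, hk, ?_⟩
      rw [Bool.and_eq_true, decide_eq_true_eq, hv]
      subst hfa
      exact ⟨hkey, (pvAnyLeMax x t val).mpr hval⟩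

lemma pvBuild_fst (s : List (Int × Int)) (b : Option Int) :
    (pvBuild s b).1 = s.map (·.1) := by
  induction s generalizing b with
  | nil => rfl
  | cons h t ih => cases h; simp [pvBuild, ih]

lemma pvBuild_snd_length (s : List (Int × Int)) (b : Option Int) :
    (pvBuild s b).2.length = s.length := by
  induction s generalizing b with
  | nil => rfl
  | cons h t ih => cases h; simp [pvBuild, ih]

lemma pvBuild_snd_getElem? (s : List (Int × Int)) (b : Int) (i : Nat) (hi : i < s.length) :
    (pvBuild s (some b)).2[i]? = some (List.foldl max b ((s.take (i + 1)).map (·.2))) := by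
  induction s generalizing b i with
  | nil => simp at hi
  | cons h t ih =>
    obtain ⟨k, m⟩ := h
    cases i with
    | zero => simp [pvBuild, max_def]; split <;> omega
    | succ j =>
      simp only [pvBuild, List.getElem?_cons_succ, List.take_succ_cons, List.map_cons,
        List.foldl_cons]
      rw [ih _ j (by simpa using hi)]
      congr 2
      simp [max_def]; split <;> split <;> omega

lemma pvBuild_none_eq (k m : Int) (t : List (Int × Int)) :
    pvBuild ((k, m) :: t) none = pvBuild ((k, m) :: t) (some m) := by
  simp [pvBuild]

-- binary-search invariant
lemma pvBisect_spec (keys : List Int) (key : Int)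
    (hmono : ∀ i j : Nat, i ≤ j → j < keys.length → keys.getD i 0 ≤ keys.getD j 0) :
    ∀ (fuel : Nat) (lo hi : Int), (hi - lo).toNat ≤ fuel →
      0 ≤ lo → lo ≤ hi → hi ≤ (keys.length : Int) →
      (∀ i : Nat, i < lo.toNat → keys.getD i 0 ≤ key) →
      (∀ i : Nat, hi.toNat ≤ i → i < keys.length → key < keys.getD i 0) →
      0 ≤ pvBisect keys key lo hi ∧ pvBisect keys key lo hi ≤ (keys.length : Int) ∧
        (∀ i : Nat, i < (pvBisect keys key lo hi).toNat → keys.getD i 0 ≤ key) ∧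
        (∀ i : Nat, (pvBisect keys key lo hi).toNat ≤ i → i < keys.length → key < keys.getD i 0) := by
  intro fuel
  induction fuel with
  | zero =>
    intro lo hi hf hlo hlh hhi hb ha
    have hnlt : ¬ lo < hi := by omega
    rw [pvBisect, dif_neg hnlt]
    have hloh : lo = hi := le_antisymm hlh (by omega)
    exact ⟨hlo, hloh ▸ hhi, hb, hloh ▸ ha⟩
  | succ n ih =>
    intro lo hi hf hlo hlh hhi hb ha
    by_cases hlt : lo < hi
    · have hmid := PySem.Int.floordiv_two_mid_bounds (le_of_lt hlt)
      have hmidlt : PySem.Int.floordiv (lo + hi) 2 < hi := by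
        rw [PySem.Int.floordiv_lt_iff_lt_mul (by norm_num)]; omega
      set m := PySem.Int.floordiv (lo + hi) 2 with hm
      have hm0 : 0 ≤ m := le_trans hlo hmid.1
      have hmlen : m.toNat < keys.length := by omega
      have hget : PySem.List.pyGetD keys m 0 = keys.getD m.toNat 0 :=
        PySem.List.pyGetD_of_nonneg keys 0 hm0
      rw [pvBisect, dif_pos hlt]
      simp only [← hm]
      by_cases hle : PySem.List.pyGetD keys m 0 ≤ key
      · rw [if_pos hle]
        refine ih (m + 1) hi (by omega) (by omega) (by omega) hhi ?_ ha
        intro i hi'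
        have him : i ≤ m.toNat := by omega
        exact le_trans (hmono i m.toNat him hmlen) (hget ▸ hle)
      · rw [if_neg hle]
        rw [not_le] at hle
        rw [hget] at hle
        refine ih lo m (by omega) hlo (by omega) (by omega) hb ?_
        intro i hi' hil
        exact lt_of_lt_of_le hle (hmono m.toNat i (by omega) hil)
    · have hloh : lo = hi := le_antisymm hlh (by omega)
      rw [pvBisect, dif_neg hlt]
      exact ⟨hlo, hloh ▸ hhi, hb, hloh ▸ ha⟩

-- the per-pair equivalence: not covered ⟺ B's binary-search test fires
lemma pvPair_iff (yy : List (Int × List Int)) (key val : Int) :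
    (isCovered key val yy = false) ↔
      (pvBisect (pvBuild (pvMaxPts yy) none).1 key 0 ((pvBuild (pvMaxPts yy) none).1.length : Int) = 0 ∨
        PySem.List.pyGetD (pvBuild (pvMaxPts yy) none).2
          (pvBisect (pvBuild (pvMaxPts yy) none).1 key 0 ((pvBuild (pvMaxPts yy) none).1.length : Int) - 1) 0 < val) := by
  have hiff := pvCovered_iff yy key val
  set s := pvMaxPts yy with hs
  have hkeys : (pvBuild s none).1 = s.map (·.1) := pvBuild_fst s none
  set keys := (pvBuild s none).1 with hk
  set pref := (pvBuild s none).2 with hp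
  have hklen : keys.length = s.length := by rw [hkeys, List.length_map]
  have hkg : ∀ j (hj : j < s.length), keys.getD j 0 = (s[j]).1 := by
    intro j hj
    rw [hkeys, List.getD_eq_getElem _ _ (by simpa using hj), List.getElem_map]
  have hmono : ∀ i j : Nat, i ≤ j → j < keys.length → keys.getD i 0 ≤ keys.getD j 0 := by
    intro i j hij hjl
    rw [hklen] at hjl
    rw [hkg i (lt_of_le_of_lt hij hjl), hkg j hjl]
    exact PySem.List.key_sorted_getElem_mono _ (fun p : Int × Int => p.1) hij hjl
  set r := pvBisect keys key 0 (keys.length : Int) with hr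
  obtain ⟨hr0, hrlen, hrle, hrgt⟩ :=
    pvBisect_spec keys key hmono (keys.length : Int).toNat 0 (keys.length : Int)
      (by omega) le_rfl (by omega) le_rfl (by omega) (by omega)
  rw [← hr] at hr0 hrlen hrle hrgt
  -- reduce to the positive statement
  have hmain : (∃ p ∈ s, p.1 ≤ key ∧ val ≤ p.2) ↔
      ¬ (r = 0 ∨ PySem.List.pyGetD pref (r - 1) 0 < val) := by
    cases hsc : s with
    | nil =>
      have hzero : r = 0 := by
        rw [hr, hkeys, hsc]
        rw [pvBisect, dif_neg (by simp)]
      simp [hzero]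
    | cons hd tl =>
      obtain ⟨k0, m0⟩ := hd
      have hpref : pref = (pvBuild s (some m0)).2 := by rw [hp, hsc, pvBuild_none_eq]
      have hplen : pref.length = s.length := by rw [hpref, pvBuild_snd_length]
      have hprefEq : ∀ i (hi : i < s.length),
          pref.getD i 0 = List.foldl max m0 ((s.take (i + 1)).map (·.2)) := by
        intro i hi
        have h1 : pref[i]? = some (List.foldl max m0 ((s.take (i + 1)).map (·.2))) := by
          rw [hpref]
          rw [hsc] at hi ⊢
          exact pvBuild_snd_getElem? _ m0 i hi
        rw [List.getD_eq_getElem _ _ (by omega), List.getElem?_eq_getElem (by omega)] at *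
        exact Option.some.inj h1
      rw [← hsc]
      constructor
      · rintro ⟨p, hpm, hpk, hpv⟩
        obtain ⟨j, hj, rfl⟩ := List.mem_iff_getElem.mp hpm
        have hjr : j < r.toNat := by
          by_contra hc
          have := hrgt j (by omega) (by omega)
          rw [hkg j hj] at this
          omega
        have hrpos : 0 < r.toNat := by omega
        intro hcon
        rcases hcon with hc0 | hcv
        · omega
        · have hge : PySem.List.pyGetD pref (r - 1) 0 = pref.getD (r - 1).toNat 0 :=
            PySem.List.pyGetD_of_nonneg pref 0 (by omega)
          have hidx : (r - 1).toNat = r.toNat - 1 := by omega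
          have hlt : r.toNat - 1 < s.length := by omega
          have hEq := hprefEq (r.toNat - 1) hlt
          have hsucc : r.toNat - 1 + 1 = r.toNat := by omega
          rw [hsucc] at hEq
          have hmem : (s[j]).2 ∈ (s.take r.toNat).map (·.2) := by
            refine List.mem_map.mpr ⟨s[j], ?_, rfl⟩
            rw [List.mem_iff_getElem]
            exact ⟨j, by simp [List.length_take]; omega, by rw [List.getElem_take]⟩
          have := (PySem.List.le_foldl_max ((s.take r.toNat).map (·.2)) m0).2 _ hmem
          rw [hge, hidx, hEq] at hcv
          omega
      · intro hcon
        rw [not_or, not_lt] at hcon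
        obtain ⟨hne0, hge⟩ := hcon
        have hrpos : 0 < r.toNat := by omega
        have hgd : PySem.List.pyGetD pref (r - 1) 0 = pref.getD (r - 1).toNat 0 :=
          PySem.List.pyGetD_of_nonneg pref 0 (by omega)
        have hidx : (r - 1).toNat = r.toNat - 1 := by omega
        have hlt : r.toNat - 1 < s.length := by omega
        have hEq := hprefEq (r.toNat - 1) hlt
        have hsucc : r.toNat - 1 + 1 = r.toNat := by omega
        rw [hsucc] at hEq
        rw [hgd, hidx, hEq] at hge
        rcases PySem.List.foldl_max_mem ((s.take r.toNat).map (·.2)) m0 with hm | hm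
        · refine ⟨(k0, m0), by rw [hsc]; exact List.mem_cons_self, ?_, by rw [hm] at hge; exact hge⟩
          have h0 := hrle 0 hrpos
          rw [hkg 0 (by rw [hsc]; simp)] at h0
          simp only [hsc, List.getElem_cons_zero] at h0
          exact h0
        · obtain ⟨q, hq, hqe⟩ := List.mem_map.mp hm
          obtain ⟨j, hj, rfl⟩ := List.mem_iff_getElem.mp hq
          have hjlen : j < s.length := by
            have := hj; simp [List.length_take] at this; omega
          have hjr : j < r.toNat := by
            have := hj; simp [List.length_take] at this; omega
          rw [List.getElem_take] at hqe
          refine ⟨s[j], List.getElem_mem hjlen, ?_, by rw [hqe]; exact hge⟩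
          have := hrle j hjr
          rw [hkg j hjlen] at this
          exact this
  constructor
  · intro hfalse
    by_contra hcon
    have : isCovered key val yy = true := hiff.mpr (hmain.mpr hcon)
    rw [hfalse] at this
    exact Bool.false_ne_true this
  · intro hright
    cases hc : isCovered key val yy with
    | false => rfl
    | true => exact absurd hright (by simpa using (hmain.mp (hiff.mp hc)))

-- ===== VERDICT (by name: the statement is the Claim_ definition above) =====
theorem infer_compliance_spec : Claim_equal_infer_compliance := by
  intro yy yn denominator _
  unfold Spec_infer_compliance infer_compliance infer_compliance_alt
  by_cases hd : denominator = 0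
  · simp [hd]
  · simp only [if_neg hd, Option.some.injEq]
    rw [pvItems, List.foldl_map]
    apply PySem.List.foldl_congr_mem
    intro acc k _
    apply PySem.List.foldl_congr_mem
    intro acc2 val _
    have h := pvPair_iff yy k val
    by_cases hc : isCovered k val yy = false
    · rw [hc]
      simp only [Bool.not_false]
      rw [if_pos trivial, if_pos (h.mp hc)]
    · have hc' : isCovered k val yy = true := by
        cases hcv : isCovered k val yy <;> simp_all
      rw [hc']
      have hnot : ¬ (pvBisect (pvBuild (pvMaxPts yy) none).1 k 0 ((pvBuild (pvMaxPts yy) none).1.length : Int) = 0 ∨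
          PySem.List.pyGetD (pvBuild (pvMaxPts yy) none).2
            (pvBisect (pvBuild (pvMaxPts yy) none).1 k 0 ((pvBuild (pvMaxPts yy) none).1.length : Int) - 1) 0 < val) := by
        intro hx
        rw [h.mpr hx] at hc'
        exact Bool.false_ne_true hc'
      simp only [Bool.not_true]
      rw [if_neg (by simp), if_neg hnot]
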